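-- pv_equiv track=rewrite | github.com/StonyShi/my_attention_ocr | python/Config.py | decode_sparse_tensor
-- ===== SOURCE A (Python) =====
-- def decode_sparse_tensor(sparse_tensor):
--     decoded_indexes = list()
--     current_i = 0
--     current_seq = []
--     for offset, i_and_index in enumerate(sparse_tensor[0]):
--         i = i_and_index[0]
--         if i != current_i:
--             decoded_indexes.append(current_seq)
--             current_i = i
--             current_seq = list()
--         current_seq.append(offset)
--     decoded_indexes.append(current_seq)
--     result = []
--     for index in decoded_indexes:
--         result.append(decode_a_seq(index, sparse_tensor))
--     return result
--
-- def decode_a_seq(indexes, spars_tensor):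
--     decoded = []
--     for m in indexes:
--         str = spars_tensor[1][m]
--         decoded.append(str)
--     return decoded
-- ===== SOURCE B (Python) =====
-- def decode_sparse_tensor(sparse_tensor):
--     # Single pass: accumulate values directly per run of equal row-indices,
--     # instead of building offset groups first and decoding them in a second pass.
--     result = []
--     current_i = 0
--     current_seq = []
--     for offset, i_and_index in enumerate(sparse_tensor[0]):
--         if i_and_index[0] != current_i:
--             result.append(current_seq)
--             current_i = i_and_index[0]
--             current_seq = []
--         current_seq.append(sparse_tensor[1][offset])
--     result.append(current_seq)
--     return result
-- ===== Notes on version B (the rewrite author's own statement) =====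
-- stated objective: simpler
-- what changed: B collects the values in one linear pass with a run accumulator, eliminating A's intermediate offset-group list and the decode_a_seq second pass.
import Mathlib
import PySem

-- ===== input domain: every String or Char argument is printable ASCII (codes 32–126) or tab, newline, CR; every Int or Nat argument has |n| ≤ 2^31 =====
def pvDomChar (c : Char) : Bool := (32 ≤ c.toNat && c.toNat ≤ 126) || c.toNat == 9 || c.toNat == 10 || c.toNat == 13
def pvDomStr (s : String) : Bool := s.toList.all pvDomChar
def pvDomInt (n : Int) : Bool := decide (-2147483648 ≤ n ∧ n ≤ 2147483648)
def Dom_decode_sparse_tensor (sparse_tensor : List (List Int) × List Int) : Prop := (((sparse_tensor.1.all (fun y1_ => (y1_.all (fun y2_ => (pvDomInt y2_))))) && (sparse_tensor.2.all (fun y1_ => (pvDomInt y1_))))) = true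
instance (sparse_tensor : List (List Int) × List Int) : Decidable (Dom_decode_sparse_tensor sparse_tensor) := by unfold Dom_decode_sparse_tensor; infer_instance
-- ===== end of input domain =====

-- B replaces A's two phases (group offsets by row index, then decode each group) by one
-- linear pass that accumulates the values of the current run directly: simpler, same cost.

-- ===== PORT A =====
-- decode_a_seq: looks up spars_tensor[1][m] for each m; out-of-range (excluded by Pre_) defaults to 0
def decode_a_seq (indexes : List Int) (spars_tensor : List (List Int) × List Int) : List Int :=
  indexes.foldl (fun decoded m => decoded ++ [(PySem.List.pyGet? spars_tensor.2 m).getD 0]) []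

def decode_sparse_tensor (sparse_tensor : List (List Int) × List Int) : List (List Int) :=
  let fin := (PySem.List.enumerate sparse_tensor.1 0).foldl
    (fun (s : Int × List Int × List (List Int)) p =>
      let i := (PySem.List.pyGet? p.2 0).getD 0   -- i_and_index[0]; [] excluded by Pre_
      if i ≠ s.1 then (i, [p.1], s.2.2 ++ [s.2.1])
      else (s.1, s.2.1 ++ [p.1], s.2.2))
    (0, [], [])
  let decoded_indexes := fin.2.2 ++ [fin.2.1]
  decoded_indexes.foldl (fun result index => result ++ [decode_a_seq index sparse_tensor]) []

-- ===== PORT B =====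
def decode_sparse_tensor_alt (sparse_tensor : List (List Int) × List Int) : List (List Int) :=
  let fin := (PySem.List.enumerate sparse_tensor.1 0).foldl
    (fun (s : Int × List Int × List (List Int)) p =>
      let i := (PySem.List.pyGet? p.2 0).getD 0
      let s' := if i ≠ s.1 then (i, ([] : List Int), s.2.2 ++ [s.2.1]) else s
      (s'.1, s'.2.1 ++ [(PySem.List.pyGet? sparse_tensor.2 p.1).getD 0], s'.2.2))
    (0, [], [])
  fin.2.2 ++ [fin.2.1]

-- ===== PRECONDITION & SPEC =====
-- Pre_: exactly where A (and B) return without IndexError: every row of sparse_tensor[0]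
-- is nonempty, and sparse_tensor[1] has a value for every offset into sparse_tensor[0].
def Pre_decode_sparse_tensor (sparse_tensor : List (List Int) × List Int) : Prop :=
  (∀ row ∈ sparse_tensor.1, row ≠ []) ∧ sparse_tensor.1.length ≤ sparse_tensor.2.length
instance (sparse_tensor : List (List Int) × List Int) : Decidable (Pre_decode_sparse_tensor sparse_tensor) := by unfold Pre_decode_sparse_tensor; infer_instance

def pvWitness_decode_sparse_tensor : (List (List Int) × List Int) := ([[0, 0], [0, 1], [1, 0]], [7, 8, 9])

def Spec_decode_sparse_tensor (sparse_tensor : List (List Int) × List Int) (out : List (List Int)) : Prop := out = decode_sparse_tensor_alt sparse_tensor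
instance (sparse_tensor : List (List Int) × List Int) (out : List (List Int)) : Decidable (Spec_decode_sparse_tensor sparse_tensor out) := by unfold Spec_decode_sparse_tensor; infer_instance

-- ===== CLAIM (what is proved, stated in full; the proofs are below) =====
def Claim_equal_decode_sparse_tensor : Prop := ∀ (sparse_tensor : List (List Int) × List Int), Dom_decode_sparse_tensor sparse_tensor → Pre_decode_sparse_tensor sparse_tensor → Spec_decode_sparse_tensor sparse_tensor (decode_sparse_tensor sparse_tensor)

-- ===== LEMMAS AND PROOFS =====

theorem decode_a_seq_append (xs : List Int) (m : Int) (st : List (List Int) × List Int) :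
    decode_a_seq (xs ++ [m]) st = decode_a_seq xs st ++ [(PySem.List.pyGet? st.2 m).getD 0] := by
  simp [decode_a_seq]

-- invariant: running B's loop body keeps the state equal to A's state with every
-- offset group replaced by its decoded value list
theorem loop_invariant (st : List (List Int) × List Int) (l : List (Int × List Int))
    (ci : Int) (cs : List Int) (di : List (List Int)) :
    (l.foldl
      (fun (s : Int × List Int × List (List Int)) p =>
        let i := (PySem.List.pyGet? p.2 0).getD 0
        let s' := if i ≠ s.1 then (i, ([] : List Int), s.2.2 ++ [s.2.1]) else s
        (s'.1, s'.2.1 ++ [(PySem.List.pyGet? st.2 p.1).getD 0], s'.2.2))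
      (ci, decode_a_seq cs st, di.map (fun idx => decode_a_seq idx st)))
    =
    (let fin := l.foldl
        (fun (s : Int × List Int × List (List Int)) p =>
          let i := (PySem.List.pyGet? p.2 0).getD 0
          if i ≠ s.1 then (i, [p.1], s.2.2 ++ [s.2.1])
          else (s.1, s.2.1 ++ [p.1], s.2.2))
        (ci, cs, di)
     (fin.1, decode_a_seq fin.2.1 st, fin.2.2.map (fun idx => decode_a_seq idx st))) := by
  induction l generalizing ci cs di with
  | nil => simp
  | cons p l ih =>
    simp only [List.foldl_cons]
    by_cases h : (PySem.List.pyGet? p.2 0).getD 0 ≠ ci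
    · simpa [h, decode_a_seq, decode_a_seq_append] using
        ih ((PySem.List.pyGet? p.2 0).getD 0) [p.1] (di ++ [cs])
    · simpa [h, decode_a_seq_append] using ih ci (cs ++ [p.1]) di

-- ===== VERDICT (by name: the statement is the Claim_ definition above) =====
theorem decode_sparse_tensor_spec : Claim_equal_decode_sparse_tensor := by
  intro st _ _
  unfold Spec_decode_sparse_tensor decode_sparse_tensor decode_sparse_tensor_alt
  have h := loop_invariant st (PySem.List.enumerate st.1 0) 0 [] []
  simp only [decode_a_seq, List.foldl_nil, List.map_nil] at h
  rw [h]
  rw [PySem.List.foldl_append_singleton_eq_map]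
  simp only [decode_a_seq, PySem.List.foldl_append_singleton_eq_map,
    List.map_append, List.map_cons, List.map_nil, List.nil_append]
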